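-- pv_equiv track=rewrite | github.com/LuchianGheorghe/osu-tapping-data | src/map_clusters.py | remove_non_consecutive_first_occurrence
-- ===== SOURCE A (Python) =====
-- def remove_non_consecutive_first_occurrence(nums):
--     # List to store the result
--     result = []
--
--     i = 0
--     while i < len(nums) - 1:
--         # Check if current number and next number are consecutive
--         if nums[i] + 1 == nums[i + 1]:
--             # Add current number if not already in result
--             if not result or nums[i] != result[-1]:
--                 result.append(nums[i])
--
--             # Skip the rest of the consecutive sequence
--             while i < len(nums) - 1 and nums[i] + 1 == nums[i + 1]:
--                 i += 1
--         i += 1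
--
--     return result
-- ===== SOURCE B (Python) =====
-- def remove_non_consecutive_first_occurrence(nums):
--     # Single flat pass over adjacent pairs with a look-back flag instead of
--     # the nested while/skip loop: a run start is a consecutive pair whose
--     # previous pair was not consecutive.
--     result = []
--     prev_consec = False
--     for a, b in zip(nums, nums[1:]):
--         consec = (a + 1 == b)
--         if consec and not prev_consec and (not result or result[-1] != a):
--             result.append(a)
--         prev_consec = consec
--     return result
-- ===== Notes on version B (the rewrite author's own statement) =====
-- stated objective: faster
-- what changed: Replaces A's nested while-loop with explicit index skipping by one flat pass over adjacent pairs keeping a previous-pair-consecutive flag (run starts are pairs whose predecessor pair was not consecutive).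
import Mathlib
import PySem

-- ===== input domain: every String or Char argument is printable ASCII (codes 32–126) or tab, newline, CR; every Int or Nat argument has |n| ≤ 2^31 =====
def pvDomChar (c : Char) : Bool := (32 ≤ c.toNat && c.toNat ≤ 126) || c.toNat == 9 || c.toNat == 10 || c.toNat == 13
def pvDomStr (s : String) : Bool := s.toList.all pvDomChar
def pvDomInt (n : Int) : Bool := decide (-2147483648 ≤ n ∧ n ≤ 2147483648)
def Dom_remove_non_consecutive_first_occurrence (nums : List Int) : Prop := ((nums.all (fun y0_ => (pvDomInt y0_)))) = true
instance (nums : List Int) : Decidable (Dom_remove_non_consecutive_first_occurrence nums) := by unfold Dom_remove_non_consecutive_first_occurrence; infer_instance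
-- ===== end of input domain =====

-- B replaces A's nested while/skip loop by one flat pass over adjacent pairs
-- with a previous-pair-consecutive flag; return values proved equal on Dom.

-- ===== PORT A =====
-- inner 'while i < len(nums) - 1 and nums[i] + 1 == nums[i + 1]: i += 1'
-- (indices are in range wherever read, so getD is exact; fuel = len(nums) bounds
-- the loop counts exactly, so the fueled recursions run the loops to completion)
def pvASkip (nums : List Int) (fuel : Nat) (i : Nat) : Nat :=
  match fuel with
  | 0 => i
  | fuel + 1 =>
      if i < nums.length - 1 ∧ nums.getD i 0 + 1 = nums.getD (i + 1) 0 then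
        pvASkip nums fuel (i + 1)
      else i

-- outer while loop of A, state (result, i)
def pvALoop (nums : List Int) (fuel : Nat) (result : List Int) (i : Nat) : List Int :=
  match fuel with
  | 0 => result
  | fuel + 1 =>
      if i < nums.length - 1 then
        if nums.getD i 0 + 1 = nums.getD (i + 1) 0 then
          pvALoop nums fuel
            (if result = [] ∨ result.getLast? ≠ some (nums.getD i 0) then
              result ++ [nums.getD i 0]
            else result)
            (pvASkip nums nums.length i + 1)
        else
          pvALoop nums fuel result (i + 1)
      else result

def remove_non_consecutive_first_occurrence (nums : List Int) : List Int :=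
  pvALoop nums nums.length [] 0

-- ===== PORT B =====
-- 'for a, b in zip(nums, nums[1:])' with the prev_consec flag folded through
def remove_non_consecutive_first_occurrence_alt (nums : List Int) : List Int :=
  ((nums.zip (PySem.List.slice nums (some 1) none)).foldl
    (fun (st : List Int × Bool) p =>
      let consec : Bool := p.1 + 1 = p.2
      if consec ∧ ¬ st.2 ∧ (st.1 = [] ∨ st.1.getLast? ≠ some p.1) then
        (st.1 ++ [p.1], consec)
      else
        (st.1, consec))
    ([], false)).1

-- ===== PRECONDITION & SPEC =====
def Spec_remove_non_consecutive_first_occurrence (nums : List Int) (out : List Int) : Prop := out = remove_non_consecutive_first_occurrence_alt nums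
instance (nums : List Int) (out : List Int) : Decidable (Spec_remove_non_consecutive_first_occurrence nums out) := by unfold Spec_remove_non_consecutive_first_occurrence; infer_instance

-- ===== CLAIM (what is proved, stated in full; the proofs are below) =====
def Claim_equal_remove_non_consecutive_first_occurrence : Prop := ∀ (nums : List Int), Dom_remove_non_consecutive_first_occurrence nums → Spec_remove_non_consecutive_first_occurrence nums (remove_non_consecutive_first_occurrence nums)

-- ===== LEMMAS AND PROOFS =====

-- reference recursion both sides are reduced to: walk the list with the flag
def pvG (prev : Bool) (acc : List Int) : List Int → List Int
  | a :: b :: rest =>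
      pvG (decide (a + 1 = b))
        (if a + 1 = b ∧ prev = false ∧ (acc = [] ∨ acc.getLast? ≠ some a) then
          acc ++ [a]
        else acc)
        (b :: rest)
  | _ => acc

theorem pvG_eq_foldl (l : List Int) (prev : Bool) (acc : List Int) :
    pvG prev acc l =
      ((l.zip l.tail).foldl
        (fun (st : List Int × Bool) p =>
          let consec : Bool := p.1 + 1 = p.2
          if consec ∧ ¬ st.2 ∧ (st.1 = [] ∨ st.1.getLast? ≠ some p.1) then
            (st.1 ++ [p.1], consec)
          else
            (st.1, consec))
        (acc, prev)).1 := by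
  induction l generalizing prev acc with
  | nil => simp [pvG]
  | cons a t ih =>
      cases t with
      | nil => simp [pvG]
      | cons b rest =>
          rw [pvG]
          rw [ih]
          simp only [List.tail_cons, List.zip_cons_cons, List.foldl_cons]
          by_cases h : a + 1 = b ∧ prev = false ∧ (acc = [] ∨ acc.getLast? ≠ some a)
          · obtain ⟨h1, h2, h3⟩ := h
            simp [h1, h2, h3]
          · simp [h]

theorem pvDrop_cons (nums : List Int) (i : Nat) (h : i < nums.length) :
    nums.drop i = nums.getD i 0 :: nums.drop (i + 1) := by
  rw [List.getD_eq_getElem _ _ h, List.drop_eq_getElem_cons h]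

theorem pvG_short (prev : Bool) (acc : List Int) (l : List Int) (h : l.length ≤ 1) :
    pvG prev acc l = acc := by
  cases l with
  | nil => simp [pvG]
  | cons a t =>
      cases t with
      | nil => simp [pvG]
      | cons b r => simp at h

theorem pvASkip_ge (nums : List Int) (fuel : Nat) (i : Nat) : i ≤ pvASkip nums fuel i := by
  induction fuel generalizing i with
  | zero => simp [pvASkip]
  | succ fuel ih =>
      rw [pvASkip]
      split
      · exact le_trans (Nat.le_succ i) (ih (i + 1))
      · exact le_refl i

theorem pvSkip_g (nums : List Int) (fuel : Nat) (acc : List Int) (i : Nat)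
    (hf : nums.length - 1 ≤ i + fuel)
    (hc : i < nums.length - 1 ∧ nums.getD i 0 + 1 = nums.getD (i + 1) 0) :
    pvG true acc (nums.drop (i + 1)) = pvG false acc (nums.drop (pvASkip nums fuel i + 1)) := by
  induction fuel generalizing i with
  | zero => omega
  | succ fuel ih =>
      rw [pvASkip, if_pos hc]
      by_cases h2 : i + 1 < nums.length - 1 ∧ nums.getD (i + 1) 0 + 1 = nums.getD (i + 2) 0
      · rw [pvDrop_cons nums (i + 1) (by omega), pvDrop_cons nums (i + 2) (by omega), pvG,
          decide_eq_true h2.2, if_neg (by simp)]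
        have := ih (i + 1) (by omega) h2
        rw [pvDrop_cons nums (i + 2) (by omega)] at this
        exact this
      · by_cases hl : i + 1 < nums.length - 1
        · have hne : ¬ nums.getD (i + 1) 0 + 1 = nums.getD (i + 2) 0 := fun hx => h2 ⟨hl, hx⟩
          obtain ⟨fuel, rfl⟩ : ∃ f, fuel = f + 1 := ⟨fuel - 1, by omega⟩
          rw [pvASkip, if_neg h2]
          have e : i + 1 + 1 = i + 2 := by omega
          rw [e, pvDrop_cons nums (i + 1) (by omega), pvDrop_cons nums (i + 2) (by omega), pvG,
            decide_eq_false hne, if_neg (fun hx => hne hx.1)]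
        · cases fuel with
          | zero =>
              rw [pvASkip]
              rw [pvG_short _ _ _ (by simp; omega), pvG_short _ _ _ (by simp; omega)]
          | succ fuel =>
              rw [pvASkip, if_neg h2]
              rw [pvG_short _ _ _ (by simp; omega), pvG_short _ _ _ (by simp; omega)]

theorem pvALoop_g (nums : List Int) (fuel : Nat) (acc : List Int) (i : Nat)
    (hf : nums.length - 1 ≤ i + fuel) :
    pvALoop nums fuel acc i = pvG false acc (nums.drop i) := by
  induction fuel generalizing i acc with
  | zero =>
      rw [pvALoop, pvG_short _ _ _ (by simp; omega)]
  | succ fuel ih =>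
      rw [pvALoop]
      by_cases h : i < nums.length - 1
      · rw [if_pos h]
        have hdi := pvDrop_cons nums i (by omega)
        have hdi1 := pvDrop_cons nums (i + 1) (by omega)
        by_cases hc : nums.getD i 0 + 1 = nums.getD (i + 1) 0
        · have hskip := pvASkip_ge nums nums.length i
          rw [if_pos hc, ih _ (pvASkip nums nums.length i + 1) (by omega), hdi, hdi1, pvG,
            decide_eq_true hc]
          by_cases hcond : acc = [] ∨ acc.getLast? ≠ some (nums.getD i 0)
          · rw [if_pos hcond, if_pos ⟨hc, rfl, hcond⟩]
            have := pvSkip_g nums nums.length (acc ++ [nums.getD i 0]) i (by omega) ⟨h, hc⟩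
            rw [hdi1] at this
            exact this.symm
          · rw [if_neg hcond, if_neg (fun hx => hcond hx.2.2)]
            have := pvSkip_g nums nums.length acc i (by omega) ⟨h, hc⟩
            rw [hdi1] at this
            exact this.symm
        · rw [if_neg hc, ih acc (i + 1) (by omega), hdi, hdi1, pvG,
            decide_eq_false hc, if_neg (fun hx => hc hx.1)]
      · rw [if_neg h, pvG_short _ _ _ (by simp; omega)]

theorem pvSliceTail (nums : List Int) : PySem.List.slice nums (some 1) none = nums.tail := by
  exact PySem.List.slice_from_one nums

-- ===== VERDICT (by name: the statement is the Claim_ definition above) =====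
theorem remove_non_consecutive_first_occurrence_spec : Claim_equal_remove_non_consecutive_first_occurrence := by
  intro nums _
  unfold Spec_remove_non_consecutive_first_occurrence
  unfold remove_non_consecutive_first_occurrence remove_non_consecutive_first_occurrence_alt
  rw [pvSliceTail, pvALoop_g nums nums.length [] 0 (by omega), ← pvG_eq_foldl]
  simp
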